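-- pv_equiv track=rewrite | github.com/AtmaHou/PromptSlotTagging | eval.py | reverse_labeling
-- ===== SOURCE A (Python) =====
-- def reverse_labeling(tokens, value, slot_name, current_labels):
--     if not current_labels:
--         current_labels = ['O'] * len(tokens)
--     assert len(tokens) == len(current_labels)
--
--     v_tokens = [tk.lower().strip() for tk in value]
--     tokens = [tk.lower().strip() for tk in tokens]
--
--
--     def is_align(i):
--         for j in range(len(v_tokens)):
--             if not (i + j < len(tokens) and tokens[i + j] == v_tokens[j] and current_labels[i + j] == 'O'):
--                 return False
--         return True
--
--     def fill_label(i):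
--         current_labels[i] = 'B-' + slot_name
--         for j in range(1, len(v_tokens)):
--             current_labels[i + j] = 'I-' + slot_name
--
--     for ind, tk in enumerate(tokens):
--         if is_align(ind):
--             fill_label(ind)
--
--     return current_labels
-- ===== SOURCE B (Python) =====
-- def reverse_labeling(tokens, value, slot_name, current_labels):
--     # Single forward scan that jumps past each filled span; matching is done
--     # against the ORIGINAL labels (in A a fill only blocks overlapping matches,
--     # so jumping is equivalent). Builds a fresh output list front-to-back
--     # (no in-place mutation, unlike A).
--     labels = list(current_labels) if current_labels else ['O'] * len(tokens)
--     toks = [t.lower().strip() for t in tokens]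
--     vals = [t.lower().strip() for t in value]
--     m = len(vals)
--     if m == 0:
--         return labels
--
--     def match_at(i):
--         return (all(toks[i + j] == vals[j] for j in range(m))
--                 and all(labels[i + j] == 'O' for j in range(m)))
--
--     out = []
--     i = 0
--     n = len(toks)
--     v0 = vals[0]
--     while i < n:
--         if i + m <= n and toks[i] == v0 and match_at(i):
--             out.append('B-' + slot_name)
--             out.extend(['I-' + slot_name] * (m - 1))
--             i += m
--         else:
--             out.append(labels[i])
--             i += 1
--     return out
-- ===== Notes on version B (the rewrite author's own statement) =====
-- stated objective: alternative
-- what changed: Replaces A's per-index rescan over a mutated label list with a single forward jump-scan that compares slices against the original labels and builds the output list front-to-back, jumping past each filled span instead of re-checking blocked positions.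
-- intended difference: On inputs with value=[] and tokens nonempty (excluding the coincidental case where current_labels is already all 'B-'+slot_name), A's vacuous alignment test succeeds at every index and it overwrites every label (even non-'O' ones) with 'B-'+slot_name, while B returns the labels unchanged, the intended behaviour for an empty value. — e.g. on reverse_labeling(["a"], [], "x", []): A returns ["B-x"], B returns ["O"]
import Mathlib
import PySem

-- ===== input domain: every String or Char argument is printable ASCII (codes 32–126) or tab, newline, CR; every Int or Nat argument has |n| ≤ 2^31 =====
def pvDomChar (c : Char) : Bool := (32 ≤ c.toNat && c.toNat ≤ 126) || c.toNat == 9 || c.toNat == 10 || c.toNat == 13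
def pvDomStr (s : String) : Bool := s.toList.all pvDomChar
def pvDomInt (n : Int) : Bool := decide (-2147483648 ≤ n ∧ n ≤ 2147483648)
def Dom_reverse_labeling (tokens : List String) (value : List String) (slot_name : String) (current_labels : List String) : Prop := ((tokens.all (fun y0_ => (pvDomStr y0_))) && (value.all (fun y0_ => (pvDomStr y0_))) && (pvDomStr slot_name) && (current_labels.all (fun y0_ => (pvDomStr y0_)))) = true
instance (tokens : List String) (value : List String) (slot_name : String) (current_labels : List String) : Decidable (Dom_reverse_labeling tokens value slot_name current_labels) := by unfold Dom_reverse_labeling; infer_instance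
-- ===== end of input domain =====

-- B replaces A's per-index rescan over a mutated label list with a single forward
-- jump-scan against the ORIGINAL labels, building the output front-to-back.
-- NOTE: Python A mutates current_labels in place; B does not. The equivalence proved
-- here is about the RETURN value only.

-- ===== PORT A =====
def pvNorm (s : String) : String := PySem.Str.strip (PySem.Str.lower s)

def pvIsAlign (toks labels vals : List String) (i : Nat) : Bool :=
  (List.range vals.length).all (fun j =>
    decide (i + j < toks.length) && (toks.getD (i + j) "" == vals.getD j "")
      && (labels.getD (i + j) "" == "O"))

def pvFill (labels : List String) (slot : String) (i m : Nat) : List String :=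
  (List.range' 1 (m - 1)).foldl (fun L j => L.set (i + j) ("I-" ++ slot))
    (labels.set i ("B-" ++ slot))

def reverse_labeling (tokens : List String) (value : List String) (slot_name : String) (current_labels : List String) : List String :=
  let labels0 := if current_labels = [] then List.replicate tokens.length "O" else current_labels
  let vals := value.map pvNorm
  let toks := tokens.map pvNorm
  (List.range toks.length).foldl
    (fun L ind => if pvIsAlign toks L vals ind then pvFill L slot_name ind vals.length else L)
    labels0

-- ===== PORT B =====
def pvMatch (toks vals orig : List String) (i : Nat) : Bool :=
  ((List.range vals.length).all (fun j => toks.getD (i + j) "" == vals.getD j ""))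
    && ((List.range vals.length).all (fun j => orig.getD (i + j) "" == "O"))

-- fuel = number of remaining loop iterations (bounded by toks.length since i grows each step)
def pvScan (toks vals orig : List String) (slot : String) : Nat → Nat → List String
  | 0, _ => []
  | fuel + 1, i =>
    if i < toks.length then
      if decide (i + vals.length ≤ toks.length)
          && ((toks.getD i "" == vals.getD 0 "") && pvMatch toks vals orig i) then
        ("B-" ++ slot) :: (List.replicate (vals.length - 1) ("I-" ++ slot)
          ++ pvScan toks vals orig slot fuel (i + vals.length))
      else
        orig.getD i "" :: pvScan toks vals orig slot fuel (i + 1)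
    else []

def reverse_labeling_alt (tokens : List String) (value : List String) (slot_name : String) (current_labels : List String) : List String :=
  let labels := if current_labels = [] then List.replicate tokens.length "O" else current_labels
  let toks := tokens.map pvNorm
  let vals := value.map pvNorm
  if vals.length = 0 then labels
  else pvScan toks vals labels slot_name toks.length 0

-- ===== PRECONDITION & SPEC =====
-- Pre_ excludes exactly the inputs on which A's assert fails (AssertionError):
-- a nonempty current_labels whose length differs from tokens'.
def Pre_reverse_labeling (tokens : List String) (value : List String) (slot_name : String) (current_labels : List String) : Prop :=
  current_labels = [] ∨ current_labels.length = tokens.length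
instance (tokens : List String) (value : List String) (slot_name : String) (current_labels : List String) : Decidable (Pre_reverse_labeling tokens value slot_name current_labels) := by unfold Pre_reverse_labeling; infer_instance

def pvWitness_reverse_labeling : List String × List String × String × List String :=
  (["a", "b"], ["b"], "x", [])

-- On inputs with value = [] and tokens nonempty, A's vacuous alignment test succeeds at
-- every index and it overwrites every label (even non-'O' ones) with 'B-'+slot_name,
-- while B leaves the labels unchanged, the intended behaviour for an empty value; the
-- only such inputs where this coincides (current_labels already all 'B-'+slot_name)
-- are excluded, so A and B differ everywhere inside D_ (reverse_labeling_tight).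
def D_reverse_labeling (tokens : List String) (value : List String) (slot_name : String) (current_labels : List String) : Prop :=
  value = [] ∧ tokens ≠ [] ∧
    (current_labels = [] ∨ current_labels ≠ List.replicate tokens.length ("B-" ++ slot_name))
instance (tokens : List String) (value : List String) (slot_name : String) (current_labels : List String) : Decidable (D_reverse_labeling tokens value slot_name current_labels) := by unfold D_reverse_labeling; infer_instance

def Spec_reverse_labeling (tokens : List String) (value : List String) (slot_name : String) (current_labels : List String) (out : List String) : Prop := ¬ D_reverse_labeling tokens value slot_name current_labels → out = reverse_labeling_alt tokens value slot_name current_labels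
instance (tokens : List String) (value : List String) (slot_name : String) (current_labels : List String) (out : List String) : Decidable (Spec_reverse_labeling tokens value slot_name current_labels out) := by unfold Spec_reverse_labeling; infer_instance

def pvDiffWitness_reverse_labeling : List String × List String × String × List String :=
  (["a"], [], "x", [])

def pvDiffWitnessOut_reverse_labeling : (List String) × (List String) := (["B-x"], ["O"])

-- ===== CLAIM (what is proved, stated in full; the proofs are below) =====
def Claim_unchanged_reverse_labeling : Prop := ∀ (tokens : List String) (value : List String) (slot_name : String) (current_labels : List String), Dom_reverse_labeling tokens value slot_name current_labels → Pre_reverse_labeling tokens value slot_name current_labels → Spec_reverse_labeling tokens value slot_name current_labels (reverse_labeling tokens value slot_name current_labels)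

def Claim_changed_reverse_labeling : Prop := Dom_reverse_labeling (pvDiffWitness_reverse_labeling.1) (pvDiffWitness_reverse_labeling.2.1) (pvDiffWitness_reverse_labeling.2.2.1) (pvDiffWitness_reverse_labeling.2.2.2) ∧ Pre_reverse_labeling (pvDiffWitness_reverse_labeling.1) (pvDiffWitness_reverse_labeling.2.1) (pvDiffWitness_reverse_labeling.2.2.1) (pvDiffWitness_reverse_labeling.2.2.2) ∧ D_reverse_labeling (pvDiffWitness_reverse_labeling.1) (pvDiffWitness_reverse_labeling.2.1) (pvDiffWitness_reverse_labeling.2.2.1) (pvDiffWitness_reverse_labeling.2.2.2) ∧ reverse_labeling (pvDiffWitness_reverse_labeling.1) (pvDiffWitness_reverse_labeling.2.1) (pvDiffWitness_reverse_labeling.2.2.1) (pvDiffWitness_reverse_labeling.2.2.2) = pvDiffWitnessOut_reverse_labeling.1 ∧ reverse_labeling_alt (pvDiffWitness_reverse_labeling.1) (pvDiffWitness_reverse_labeling.2.1) (pvDiffWitness_reverse_labeling.2.2.1) (pvDiffWitness_reverse_labeling.2.2.2) = pvDiffWitnessOut_reverse_labeling.2 ∧ pvDiffWitnessOut_reverse_labeling.1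 ≠ pvDiffWitnessOut_reverse_labeling.2

def Claim_exact_reverse_labeling : Prop := ∀ (tokens : List String) (value : List String) (slot_name : String) (current_labels : List String), Dom_reverse_labeling tokens value slot_name current_labels → Pre_reverse_labeling tokens value slot_name current_labels → D_reverse_labeling tokens value slot_name current_labels → reverse_labeling tokens value slot_name current_labels ≠ reverse_labeling_alt tokens value slot_name current_labels

-- ===== LEMMAS AND PROOFS =====

theorem pv_ne_O (p slot : String) (hp : p.length = 2) : (p ++ slot) ≠ "O" := by
  intro h
  have h1 := congrArg String.length h
  rw [String.length_append] at h1
  have h3 : ("O" : String).length = 1 := by decide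
  omega

theorem pv_align_iff (toks L vals : List String) (i : Nat) :
    pvIsAlign toks L vals i = true ↔
      ∀ j < vals.length, i + j < toks.length ∧ toks.getD (i + j) "" = vals.getD j ""
        ∧ L.getD (i + j) "" = "O" := by
  simp [pvIsAlign, List.all_eq_true, List.mem_range, Bool.and_eq_true, beq_iff_eq,
    decide_eq_true_eq, and_assoc]

def pvMatchB (toks vals orig : List String) (i : Nat) : Bool :=
  decide (i + vals.length ≤ toks.length) && pvMatch toks vals orig i

theorem pv_matchB_iff (toks vals L0 : List String) (i : Nat) :
    pvMatchB toks vals L0 i = true ↔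
      i + vals.length ≤ toks.length ∧
        (∀ j < vals.length, toks.getD (i + j) "" = vals.getD j "") ∧
        (∀ j < vals.length, L0.getD (i + j) "" = "O") := by
  simp [pvMatchB, pvMatch, List.all_eq_true, List.mem_range, Bool.and_eq_true, beq_iff_eq]

theorem pv_match_bound (toks vals L0 : List String) (i : Nat)
    (h : pvMatchB toks vals L0 i = true) :
    i + vals.length ≤ toks.length := by
  rw [pv_matchB_iff] at h
  exact h.1

theorem pv_align_eq_match (toks vals L L0 : List String) (i : Nat)
    (hm : 1 ≤ vals.length)
    (hL : L.length = toks.length) (hL0 : L0.length = toks.length)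
    (hag : ∀ k, i ≤ k → L.getD k "" = L0.getD k "") :
    pvIsAlign toks L vals i = pvMatchB toks vals L0 i := by
  rw [Bool.eq_iff_iff, pv_align_iff, pv_matchB_iff]
  constructor
  · intro h
    have hb : i + vals.length ≤ toks.length := by
      have := (h (vals.length - 1) (by omega)).1
      omega
    refine ⟨hb, fun j hj => (h j hj).2.1, fun j hj => ?_⟩
    rw [← hag (i + j) (by omega)]
    exact (h j hj).2.2
  · intro ⟨hb, ht, hO⟩ j hj
    exact ⟨by omega, ht j hj, by rw [hag (i + j) (by omega)]; exact hO j hj⟩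

theorem pv_foldl_set_shift {α : Type} (c : α) (i : Nat) : ∀ (cnt a : Nat) (L : List α),
    (List.range' a cnt).foldl (fun l j => l.set (i + j) c) L
      = (List.range' (i + a) cnt).foldl (fun l j => l.set j c) L
  | 0, _, _ => rfl
  | cnt + 1, a, L => by
    rw [List.range'_succ, List.range'_succ, List.foldl_cons, List.foldl_cons,
      pv_foldl_set_shift c i cnt (a + 1) (L.set (i + a) c)]
    have : i + (a + 1) = i + a + 1 := by omega
    rw [this]

theorem pv_foldl_set_seg {α : Type} (c : α) : ∀ (cnt a : Nat) (L : List α), a + cnt ≤ L.length →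
    (List.range' a cnt).foldl (fun l j => l.set j c) L
      = L.take a ++ (List.replicate cnt c ++ L.drop (a + cnt))
  | 0, a, L, _ => by simp
  | cnt + 1, a, L, h => by
    rw [List.range'_succ, List.foldl_cons,
      pv_foldl_set_seg c cnt (a + 1) (L.set a c) (by rw [List.length_set]; omega)]
    rw [List.set_eq_take_cons_drop c (show a < L.length by omega)]
    have hta : (L.take a).length = a := by rw [List.length_take]; omega
    apply List.ext_getElem?
    intro k
    simp only [List.getElem?_append, List.getElem?_take, List.getElem?_drop,
      List.getElem?_replicate, List.length_take, List.length_append, List.length_cons,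
      List.length_replicate, List.length_drop, List.getElem?_cons]
    split_ifs <;> first
      | rfl
      | omega
      | (simp_all; omega)
      | (exfalso; omega)
      | (congr 1; omega)

theorem pv_fill_eq (L : List String) (slot : String) (i m : Nat)
    (hm : 1 ≤ m) (hin : i + m ≤ L.length) :
    pvFill L slot i m =
      L.take i ++ ("B-" ++ slot) :: (List.replicate (m - 1) ("I-" ++ slot) ++ L.drop (i + m)) := by
  unfold pvFill
  rw [pv_foldl_set_shift, pv_foldl_set_seg _ (m - 1) (i + 1) _
    (by rw [List.length_set]; omega)]
  rw [List.set_eq_take_cons_drop _ (show i < L.length by omega)]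
  have hta : (L.take i).length = i := by rw [List.length_take]; omega
  apply List.ext_getElem?
  intro k
  simp only [List.getElem?_append, List.getElem?_take, List.getElem?_drop,
    List.getElem?_replicate, List.length_take, List.length_append, List.length_cons,
    List.length_replicate, List.length_drop, List.getElem?_cons]
  split_ifs <;> first
    | rfl
    | omega
    | (simp_all; omega)
    | (exfalso; omega)
    | (congr 1; omega)

theorem pv_fillform_getD (L : List String) (B I : String) (i m k : Nat)
    (hm : 1 ≤ m) (hin : i + m ≤ L.length) :
    (L.take i ++ B :: (List.replicate (m - 1) I ++ L.drop (i + m))).getD k "" =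
      if k < i then L.getD k "" else if k = i then B
        else if k < i + m then I else L.getD k "" := by
  have hta : (L.take i).length = i := by rw [List.length_take]; omega
  simp only [List.getD_eq_getElem?_getD, List.getElem?_append, List.getElem?_take,
    List.getElem?_drop, List.getElem?_replicate, List.getElem?_cons, hta,
    List.length_replicate]
  split_ifs <;> first
    | rfl
    | omega
    | (exfalso; omega)
    | (congr 2; omega)
    | (rw [show i + m + (k - i - 1 - (m - 1)) = k from by omega])

theorem pv_fillform_length (L : List String) (B I : String) (i m : Nat)
    (hm : 1 ≤ m) (hin : i + m ≤ L.length) :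
    (L.take i ++ B :: (List.replicate (m - 1) I ++ L.drop (i + m))).length = L.length := by
  simp only [List.length_append, List.length_cons, List.length_replicate, List.length_take,
    List.length_drop]
  omega

theorem pv_fillform_take (L : List String) (B I : String) (i m : Nat)
    (hm : 1 ≤ m) (hin : i + m ≤ L.length) :
    (L.take i ++ B :: (List.replicate (m - 1) I ++ L.drop (i + m))).take (i + m) =
      L.take i ++ B :: List.replicate (m - 1) I := by
  have h1 : L.take i ++ B :: (List.replicate (m - 1) I ++ L.drop (i + m)) =
      (L.take i ++ B :: List.replicate (m - 1) I) ++ L.drop (i + m) := by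
    simp [List.append_assoc]
  rw [h1, List.take_left' (by
    simp only [List.length_append, List.length_cons, List.length_replicate, List.length_take]
    omega)]

theorem pv_foldl_noop (toks vals : List String) (slot : String) :
    ∀ (cnt a : Nat) (L' : List String),
      (∀ ind, a ≤ ind → ind < a + cnt → pvIsAlign toks L' vals ind = false) →
      (List.range' a cnt).foldl
        (fun L ind => if pvIsAlign toks L vals ind then pvFill L slot ind vals.length else L) L'
        = L'
  | 0, _, _, _ => rfl
  | cnt + 1, a, L', h => by
    rw [List.range'_succ, List.foldl_cons, h a (by omega) (by omega)]
    simp only [Bool.false_eq_true, if_false]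
    exact pv_foldl_noop toks vals slot cnt (a + 1) L' (fun ind h1 h2 => h ind (by omega) (by omega))

theorem pv_guard_eq (toks vals L0 : List String) (i : Nat) (hm : 1 ≤ vals.length) :
    (decide (i + vals.length ≤ toks.length)
        && ((toks.getD i "" == vals.getD 0 "") && pvMatch toks vals L0 i))
      = pvMatchB toks vals L0 i := by
  rw [pvMatchB]
  cases hb : decide (i + vals.length ≤ toks.length)
  · rw [Bool.false_and, Bool.false_and]
  · rw [Bool.true_and, Bool.true_and]
    cases hp : pvMatch toks vals L0 i
    · rw [Bool.and_false]
    · rw [Bool.and_true]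
      have h0 : toks.getD (i + 0) "" = vals.getD 0 "" := by
        simp only [pvMatch, Bool.and_eq_true] at hp
        have := (List.all_eq_true.mp hp.1) 0 (List.mem_range.mpr hm)
        exact beq_iff_eq.mp (by simpa using this)
      rw [Nat.add_zero] at h0
      rw [h0]
      exact beq_self_eq_true _

theorem pv_A_empty (tokens : List String) (slot : String) (cl : List String)
    (hPre : cl = [] ∨ cl.length = tokens.length) :
    reverse_labeling tokens [] slot cl = List.replicate tokens.length ("B-" ++ slot) := by
  simp only [reverse_labeling, List.map_nil]
  have hL0 : (if cl = [] then List.replicate tokens.length "O" else cl).length = tokens.length := by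
    by_cases hcl : cl = []
    · rw [if_pos hcl, List.length_replicate]
    · rw [if_neg hcl]
      cases hPre with
      | inl h => exact absurd h hcl
      | inr h => exact h
  have hfun : (fun (L : List String) ind =>
      if pvIsAlign (tokens.map pvNorm) L ([] : List String) ind then
        pvFill L slot ind ([] : List String).length else L)
      = fun (L : List String) ind => L.set ind ("B-" ++ slot) := by
    funext L ind
    simp [pvIsAlign, pvFill]
  rw [hfun, List.range_eq_range', List.length_map,
    pv_foldl_set_seg ("B-" ++ slot) tokens.length 0 _ (by omega)]
  simp only [List.take_zero, List.nil_append, Nat.zero_add]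
  rw [List.drop_of_length_le (by omega), List.append_nil]

theorem pv_scan_eq (toks vals L0 : List String) (slot : String)
    (hm : 1 ≤ vals.length) (hL0 : L0.length = toks.length) :
    ∀ (fuel i : Nat) (L : List String), L.length = toks.length →
      toks.length - i ≤ fuel →
      (∀ k, i ≤ k → L.getD k "" = L0.getD k "") →
      (List.range' i (toks.length - i)).foldl
        (fun L ind => if pvIsAlign toks L vals ind then pvFill L slot ind vals.length else L) L
        = L.take i ++ pvScan toks vals L0 slot fuel i := by
  intro fuel
  induction fuel with
  | zero =>
    intro i L hlen hfuel hag
    rw [show toks.length - i = 0 from by omega]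
    simp only [List.range'_zero, List.foldl_nil, pvScan]
    rw [List.take_of_length_le (by omega), List.append_nil]
  | succ f ih =>
    intro i L hlen hfuel hag
    by_cases hi : i < toks.length
    · rw [show toks.length - i = (toks.length - (i + 1)) + 1 from by omega,
        List.range'_succ, List.foldl_cons]
      have hAM : pvIsAlign toks L vals i = pvMatchB toks vals L0 i :=
        pv_align_eq_match toks vals L L0 i hm hlen hL0 hag
      by_cases hM : pvMatchB toks vals L0 i = true
      · simp only [hAM, hM, if_true]
        have hin : i + vals.length ≤ toks.length := pv_match_bound toks vals L0 i hM
        have hinL : i + vals.length ≤ L.length := by omega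
        have hfill := pv_fill_eq L slot i vals.length hm hinL
        set m := vals.length with hmdef
        set B := "B-" ++ slot
        set I := "I-" ++ slot
        set L' := L.take i ++ B :: (List.replicate (m - 1) I ++ L.drop (i + m)) with hL'
        rw [hfill]
        have hsplit : List.range' (i + 1) (toks.length - (i + 1)) =
            List.range' (i + 1) (m - 1) ++ List.range' (i + m) (toks.length - (i + m)) := by
          rw [show toks.length - (i + 1) = (m - 1) + (toks.length - (i + m)) from by omega]
          rw [← List.range'_append]
          rw [show i + 1 + 1 * (m - 1) = i + m from by omega]
        rw [hsplit, List.foldl_append]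
        have hnoop : ∀ ind, i + 1 ≤ ind → ind < i + 1 + (m - 1) →
            pvIsAlign toks L' vals ind = false := by
          intro ind h1 h2
          rw [← Bool.not_eq_true, pv_align_iff]
          intro hall
          have h0 := hall 0 (by omega)
          rw [Nat.add_zero] at h0
          have hI : L'.getD ind "" = I := by
            rw [hL', pv_fillform_getD L B I i m ind hm hinL]
            rw [if_neg (by omega), if_neg (by omega), if_pos (by omega)]
          rw [hI] at h0
          exact pv_ne_O "I-" slot (by decide) h0.2.2
        rw [pv_foldl_noop toks vals slot (m - 1) (i + 1) L' hnoop]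
        have hlen' : L'.length = toks.length := by
          rw [hL', pv_fillform_length L B I i m hm hinL]; exact hlen
        have hag' : ∀ k, i + m ≤ k → L'.getD k "" = L0.getD k "" := by
          intro k hk
          rw [hL', pv_fillform_getD L B I i m k hm hinL,
            if_neg (by omega), if_neg (by omega), if_neg (by omega)]
          exact hag k (by omega)
        rw [ih (i + m) L' hlen' (by omega) hag']
        have hscan : pvScan toks vals L0 slot (f + 1) i =
            B :: (List.replicate (m - 1) I ++ pvScan toks vals L0 slot f (i + m)) := by
          have hG : (decide (i + vals.length ≤ toks.length)
              && ((toks.getD i "" == vals.getD 0 "") && pvMatch toks vals L0 i)) = true := by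
            rw [pv_guard_eq toks vals L0 i hm]; exact hM
          simp only [pvScan, if_pos hi, hG, if_true]
          rfl
        rw [hscan, hL', pv_fillform_take L B I i m hm hinL]
        simp [List.append_assoc]
      · have hM' : pvMatchB toks vals L0 i = false := by
          cases h : pvMatchB toks vals L0 i
          · rfl
          · exact absurd h hM
        simp only [hAM, hM', Bool.false_eq_true, if_false]
        rw [ih (i + 1) L hlen (by omega) (fun k hk => hag k (by omega))]
        have hscan : pvScan toks vals L0 slot (f + 1) i =
            L0.getD i "" :: pvScan toks vals L0 slot f (i + 1) := by
          have hG : (decide (i + vals.length ≤ toks.length)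
              && ((toks.getD i "" == vals.getD 0 "") && pvMatch toks vals L0 i)) = false := by
            rw [pv_guard_eq toks vals L0 i hm]; exact hM'
          simp only [pvScan, if_pos hi, hG, Bool.false_eq_true, if_false]
        rw [hscan, List.take_add_one, List.getElem?_eq_getElem (show i < L.length by omega)]
        have : L[i] = L0.getD i "" := by
          have h1 := hag i (by omega)
          rw [List.getD_eq_getElem?_getD, List.getElem?_eq_getElem (show i < L.length by omega)] at h1
          exact h1
        rw [this]
        simp [List.append_assoc]
    · rw [show toks.length - i = 0 from by omega]
      simp only [List.range'_zero, List.foldl_nil, pvScan, if_neg hi]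
      rw [List.take_of_length_le (by omega), List.append_nil]

-- ===== VERDICT (by name: the statement is the Claim_ definition above) =====
theorem reverse_labeling_spec : Claim_unchanged_reverse_labeling := by
  intro tokens value slot_name current_labels hDom hPre hD
  by_cases hv : value = []
  · subst hv
    rw [pv_A_empty tokens slot_name current_labels hPre]
    by_cases ht : tokens = []
    · subst ht
      have hcl : current_labels = [] := by
        cases hPre with
        | inl h => exact h
        | inr h => exact List.eq_nil_of_length_eq_zero h
      subst hcl
      simp [reverse_labeling_alt]
    · have hrep : current_labels ≠ [] ∧
          current_labels = List.replicate tokens.length ("B-" ++ slot_name) := by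
        by_cases hcl : current_labels = []
        · exact absurd ⟨rfl, ht, Or.inl hcl⟩ hD
        · refine ⟨hcl, ?_⟩
          by_contra hne
          exact hD ⟨rfl, ht, Or.inr hne⟩
      rw [hrep.2]
      have hne : List.replicate tokens.length ("B-" ++ slot_name) ≠ ([] : List String) := by
        rw [hrep.2] at hrep
        exact hrep.1
      simp [reverse_labeling_alt, hne]
  · unfold Spec_reverse_labeling at *
    simp only [reverse_labeling, reverse_labeling_alt]
    set toks := tokens.map pvNorm with htoks
    set vals := value.map pvNorm with hvals
    set L0 := (if current_labels = [] then List.replicate tokens.length "O" else current_labels)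
      with hL0def
    have hm : 1 ≤ vals.length := by
      rw [hvals, List.length_map]
      cases value
      · exact absurd rfl hv
      · simp
    have hL0 : L0.length = toks.length := by
      rw [hL0def, htoks, List.length_map]
      by_cases hcl : current_labels = []
      · rw [if_pos hcl, List.length_replicate]
      · rw [if_neg hcl]
        cases hPre with
        | inl h => exact absurd h hcl
        | inr h => exact h
    rw [if_neg (by omega)]
    have key := pv_scan_eq toks vals L0 slot_name hm hL0 toks.length 0 L0 hL0 (by omega)
      (fun k _ => rfl)
    rw [Nat.sub_zero] at key
    rw [List.range_eq_range', key, List.take_zero, List.nil_append]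
theorem reverse_labeling_changed : Claim_changed_reverse_labeling := by
  unfold Claim_changed_reverse_labeling; decide

theorem reverse_labeling_tight : Claim_exact_reverse_labeling := by
  intro tokens value slot_name current_labels hDom hPre hD hEq
  obtain ⟨hv, ht, hcl⟩ := hD
  subst hv
  rw [pv_A_empty tokens slot_name current_labels hPre] at hEq
  simp only [reverse_labeling_alt, List.map_nil, List.length_nil] at hEq
  by_cases hclnil : current_labels = []
  · rw [if_pos hclnil] at hEq
    cases tokens with
    | nil => exact ht rfl
    | cons t ts =>
      rw [List.length_cons, List.replicate_succ, List.replicate_succ] at hEq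
      exact pv_ne_O "B-" slot_name (by decide) (List.cons.inj hEq).1
  · rw [if_neg hclnil] at hEq
    cases hcl with
    | inl h => exact hclnil h
    | inr h => exact h hEq.symm
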